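-- pv_equiv track=rewrite | github.com/HNYao/masterThesis | GeoL_diffuser/models/diffusion.py | get_split_indices
-- ===== SOURCE A (Python) =====
-- def get_split_indices(total, n):
--     base = total // n
--     remainder = total % n
--
--     result = [0]
--     cumulative_sum = 0
--
--     for i in range(n):
--         # 如果有余数，前 remainder 份分多 1
--         part = base + (1 if i < remainder else 0)
--         cumulative_sum += part
--         result.append(cumulative_sum)
--
--
--     return result
-- ===== SOURCE B (Python) =====
-- def get_split_indices(total, n):
--     base = total // n
--     remainder = total % n
--     return [0] + [i * base + min(i, remainder) for i in range(1, n + 1)]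
-- ===== Notes on version B (the rewrite author's own statement) =====
-- stated objective: idiomatic
-- what changed: Replaced the running-sum loop that appends cumulative boundaries with a direct closed-form list comprehension result[i] = i*base + min(i, remainder).
import Mathlib
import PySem

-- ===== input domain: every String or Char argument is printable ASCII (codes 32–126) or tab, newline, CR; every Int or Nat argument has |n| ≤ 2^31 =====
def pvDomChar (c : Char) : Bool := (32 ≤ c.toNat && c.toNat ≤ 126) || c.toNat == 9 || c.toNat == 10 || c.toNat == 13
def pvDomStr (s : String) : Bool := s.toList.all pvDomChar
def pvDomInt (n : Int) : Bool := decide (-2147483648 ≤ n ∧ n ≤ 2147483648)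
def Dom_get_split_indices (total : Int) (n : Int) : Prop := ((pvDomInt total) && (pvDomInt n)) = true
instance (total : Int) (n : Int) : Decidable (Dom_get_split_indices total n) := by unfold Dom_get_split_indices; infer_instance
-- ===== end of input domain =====

-- B replaces A's running-sum accumulation with the closed-form boundary i*base + min(i, remainder); same O(n) cost, more idiomatic.

-- ===== PORT A =====
-- literal port of A: running sum appended to a growing result list
def get_split_indices (total : Int) (n : Int) : List Int :=
  let base := PySem.Int.floordiv total n
  let remainder := PySem.Int.mod total n
  let st := (PySem.List.pyRange 0 n).foldl
    (fun (st : List Int × Int) i =>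
      let part := base + (if i < remainder then (1 : Int) else 0)
      let cumulative_sum := st.2 + part
      (st.1 ++ [cumulative_sum], cumulative_sum)) ([0], 0)
  st.1

-- ===== PORT B =====
-- literal port of B: closed-form comprehension over 1..n
def get_split_indices_alt (total : Int) (n : Int) : List Int :=
  let base := PySem.Int.floordiv total n
  let remainder := PySem.Int.mod total n
  [0] ++ (PySem.List.pyRange 1 (n + 1)).map (fun i => i * base + min i remainder)

-- ===== PRECONDITION & SPEC =====
-- Pre_ excludes exactly n = 0, where the Python A raises ZeroDivisionError (total // n).
def Pre_get_split_indices (total : Int) (n : Int) : Prop := n ≠ 0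
instance (total : Int) (n : Int) : Decidable (Pre_get_split_indices total n) := by unfold Pre_get_split_indices; infer_instance
def pvWitness_get_split_indices : Int × Int := (7, 3)

def Spec_get_split_indices (total : Int) (n : Int) (out : List Int) : Prop := out = get_split_indices_alt total n
instance (total : Int) (n : Int) (out : List Int) : Decidable (Spec_get_split_indices total n out) := by unfold Spec_get_split_indices; infer_instance

-- ===== CLAIM (what is proved, stated in full; the proofs are below) =====
def Claim_equal_get_split_indices : Prop := ∀ (total : Int) (n : Int), Dom_get_split_indices total n → Pre_get_split_indices total n → Spec_get_split_indices total n (get_split_indices total n)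

-- ===== LEMMAS AND PROOFS =====

-- empty range when the upper bound is not above the lower one
theorem pyRange_eq_nil_of_le {a b : Int} (h : b ≤ a) : PySem.List.pyRange a b = [] := by
  simp [PySem.List.pyRange]
  omega

-- loop invariant: after m iterations the result list is the closed-form prefix
-- and the running sum is the closed-form boundary m*base + min m r
theorem get_split_indices_loop (base r : Int) (hr : 0 ≤ r) (m : Nat) :
    (PySem.List.pyRange 0 (m : Int)).foldl
      (fun (st : List Int × Int) i =>
        (st.1 ++ [st.2 + (base + if i < r then (1 : Int) else 0)],
         st.2 + (base + if i < r then (1 : Int) else 0))) ([0], 0)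
    = ([0] ++ (PySem.List.pyRange 1 ((m : Int) + 1)).map (fun i => i * base + min i r),
       (m : Int) * base + min (m : Int) r) := by
  induction m with
  | zero =>
      simp [pyRange_eq_nil_of_le (le_refl (0:Int)), pyRange_eq_nil_of_le (le_refl (1:Int))]
      omega
  | succ k ih =>
      have h1 : ((k + 1 : Nat) : Int) = (k : Int) + 1 := by push_cast; ring
      rw [h1, PySem.List.pyRange_one_succ_right (by omega : (0:Int) ≤ (k : Int)),
          List.foldl_append, ih,
          PySem.List.pyRange_one_succ_right (by omega : (1:Int) ≤ (k : Int) + 1)]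
      have hmin : min ((k:Int) + 1) r = min (k:Int) r + (if (k:Int) < r then (1:Int) else 0) := by
        split_ifs <;> omega
      simp [List.map_append, hmin]
      ring

-- ===== VERDICT (by name: the statement is the Claim_ definition above) =====
theorem get_split_indices_spec : Claim_equal_get_split_indices := by
  intro total n _ hn
  have hn' : n ≠ 0 := hn
  unfold Spec_get_split_indices get_split_indices get_split_indices_alt
  dsimp only
  by_cases hpos : 0 < n
  · have hr : 0 ≤ PySem.Int.mod total n := PySem.Int.mod_nonneg total hpos
    obtain ⟨m, rfl⟩ : ∃ m : Nat, n = (m : Int) := ⟨n.toNat, by omega⟩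
    rw [get_split_indices_loop _ _ hr m]
  · have hneg : n < 0 := by omega
    rw [pyRange_eq_nil_of_le (by omega : n ≤ 0),
        pyRange_eq_nil_of_le (by omega : n + 1 ≤ 1)]
    simp
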